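-- pv_equiv track=rewrite | github.com/facagovi/trabalhoTr1 | fisica.py | bipolar
-- ===== SOURCE A (Python) =====
-- def bipolar(trem):
--     sinal = []
--
--     ultimo = True
--     for bit in trem:
--         if bit == 1:
--             if ultimo:
--                 sinal.append(1)
--                 ultimo = False
--             else:
--                 sinal.append(-1)
--                 ultimo = True
--         else:
--             sinal.append(0)
--     return sinal
-- ===== SOURCE B (Python) =====
-- def bipolar(trem):
--     bits = list(trem)
--     ones = [i for i, b in enumerate(bits) if b == 1]
--     sinal = [0] * len(bits)
--     for k, pos in enumerate(ones):
--         sinal[pos] = 1 if k % 2 == 0 else -1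
--     return sinal
-- ===== Notes on version B (the rewrite author's own statement) =====
-- stated objective: alternative
-- what changed: Replaces A's single-pass toggle loop by a two-pass index-and-scatter: collect the indices of 1-bits, allocate a zero signal of the input length, then scatter +1/-1 into those positions by the parity of their rank.
import Mathlib
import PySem

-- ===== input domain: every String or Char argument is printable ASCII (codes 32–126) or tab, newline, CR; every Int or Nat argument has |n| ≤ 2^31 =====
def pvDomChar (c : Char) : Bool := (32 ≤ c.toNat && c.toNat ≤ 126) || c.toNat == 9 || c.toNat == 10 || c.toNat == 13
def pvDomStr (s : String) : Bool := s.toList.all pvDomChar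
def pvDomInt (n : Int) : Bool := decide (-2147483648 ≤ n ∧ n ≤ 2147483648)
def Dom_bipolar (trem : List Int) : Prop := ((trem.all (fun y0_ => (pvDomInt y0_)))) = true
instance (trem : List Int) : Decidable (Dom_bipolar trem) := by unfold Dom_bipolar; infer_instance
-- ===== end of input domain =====

-- B replaces A's single-pass polarity-toggle loop by a two-pass index-and-scatter
-- (collect indices of 1-bits, then scatter +1/-1 by rank parity); alternative decomposition, same cost.


-- ===== PORT A =====
-- A's for-loop over the bits, as structural recursion over the same state (sinal, ultimo)
def bipolarLoop (trem : List Int) (sinal : List Int) (ultimo : Bool) : List Int :=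
  match trem with
  | [] => sinal
  | bit :: rest =>
    if bit == 1 then
      if ultimo then bipolarLoop rest (sinal ++ [1]) false
      else bipolarLoop rest (sinal ++ [-1]) true
    else bipolarLoop rest (sinal ++ [0]) ultimo

def bipolar (trem : List Int) : List Int := bipolarLoop trem [] true

-- ===== PORT B =====
-- Source B's scatter loop `for k, pos in enumerate(ones): sinal[pos] = …`, as structural recursion.
-- `sinal[pos] = v` is ported as List.set pos.toNat: every pos comes from enumerate,
-- so 0 ≤ pos < len(sinal) and the assignment is exact (never raises).
def scatterLoop (pairs : List (Int × Int)) (sinal : List Int) : List Int :=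
  match pairs with
  | [] => sinal
  | (k, pos) :: rest => scatterLoop rest (sinal.set pos.toNat (if k % 2 == 0 then 1 else -1))

-- literal port of Source B: ones = indices of 1-bits, sinal = [0]*len, then scatter by rank parity
def bipolar_alt (trem : List Int) : List Int :=
  scatterLoop
    (PySem.List.enumerate
      ((PySem.List.enumerate trem).filterMap (fun p => if p.2 == 1 then some p.1 else none)))
    (List.replicate trem.length 0)

-- ===== PRECONDITION & SPEC =====
def Spec_bipolar (trem : List Int) (out : List Int) : Prop := out = bipolar_alt trem
instance (trem : List Int) (out : List Int) : Decidable (Spec_bipolar trem out) := by unfold Spec_bipolar; infer_instance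

-- ===== CLAIM (what is proved, stated in full; the proofs are below) =====
def Claim_equal_bipolar : Prop := ∀ (trem : List Int), Dom_bipolar trem → Spec_bipolar trem (bipolar trem)

-- ===== LEMMAS AND PROOFS =====

-- reference function: the bipolar signal with explicit "next 1-bit is positive" flag
def pvAux (t : List Int) (u : Bool) : List Int :=
  match t with
  | [] => []
  | b :: t => if b = 1 then (if u then 1 else -1) :: pvAux t (!u) else 0 :: pvAux t u

-- the indices (from offset j) of the 1-bits
def pvOnes (t : List Int) (j : Int) : List Int :=
  match t with
  | [] => []
  | b :: t => if b = 1 then j :: pvOnes t (j + 1) else pvOnes t (j + 1)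

-- the scatter loop with explicit rank counter k
def pvScat (k : Int) (ps : List Int) (s : List Int) : List Int :=
  match ps with
  | [] => s
  | p :: ps => pvScat (k + 1) ps (s.set p.toNat (if k % 2 == 0 then 1 else -1))

theorem pvFoldA (t : List Int) : ∀ (acc : List Int) (u : Bool),
    bipolarLoop t acc u = acc ++ pvAux t u := by
  induction t with
  | nil => intro acc u; simp [bipolarLoop, pvAux]
  | cons b t ih =>
    intro acc u
    by_cases hb : b = 1
    · cases u <;> simp [bipolarLoop, pvAux, hb, ih]
    · simp [bipolarLoop, pvAux, hb, ih]

theorem pvOnesEq (t : List Int) : ∀ (j : Int),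
    (PySem.List.enumerate t j).filterMap (fun p => if p.2 == 1 then some p.1 else none)
      = pvOnes t j := by
  induction t with
  | nil => intro j; simp [PySem.List.enumerate_nil, pvOnes]
  | cons b t ih =>
    intro j
    simp only [beq_iff_eq] at ih
    by_cases hb : b = 1 <;>
      simp [PySem.List.enumerate_cons, hb, pvOnes, ih]

theorem pvScatEq (ps : List Int) : ∀ (k : Int) (s : List Int),
    scatterLoop (PySem.List.enumerate ps k) s = pvScat k ps s := by
  induction ps with
  | nil => intro k s; simp [PySem.List.enumerate_nil, scatterLoop, pvScat]
  | cons p ps ih =>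
    intro k s
    simp [PySem.List.enumerate_cons, scatterLoop, pvScat, ih]

theorem pvOnesShift (t : List Int) : ∀ (j : Int),
    pvOnes t (j + 1) = (pvOnes t j).map (· + 1) := by
  induction t with
  | nil => intro j; simp [pvOnes]
  | cons b t ih =>
    intro j
    by_cases hb : b = 1 <;> simp [pvOnes, hb, ih]

theorem pvOnesNonneg (t : List Int) : ∀ (j : Int), 0 ≤ j → ∀ p ∈ pvOnes t j, 0 ≤ p := by
  induction t with
  | nil => intro j _ p hp; simp [pvOnes] at hp
  | cons b t ih =>
    intro j hj p hp
    by_cases hb : b = 1 <;> simp [pvOnes, hb] at hp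
    · rcases hp with rfl | hp
      · exact hj
      · exact ih (j + 1) (by omega) p hp
    · exact ih (j + 1) (by omega) p hp

theorem pvScatShift (ps : List Int) : ∀ (k : Int) (x : Int) (s : List Int),
    (∀ p ∈ ps, 0 ≤ p) →
    pvScat k (ps.map (· + 1)) (x :: s) = x :: pvScat k ps s := by
  induction ps with
  | nil => intro k x s _; simp [pvScat]
  | cons p ps ih =>
    intro k x s hnn
    have hp : 0 ≤ p := hnn p (by simp)
    have hnat : (p + 1).toNat = p.toNat + 1 := by omega
    simp only [List.map_cons, pvScat, hnat, List.set]
    exact ih (k + 1) x _ (fun q hq => hnn q (by simp [hq]))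

theorem pvParityFlip (k : Int) : ((k + 1) % 2 == 0) = !(k % 2 == 0) := by
  have h := Int.emod_two_eq k
  rcases h with h | h <;> simp [h] <;> omega

theorem pvMain (t : List Int) : ∀ (k : Int),
    pvScat k (pvOnes t 0) (List.replicate t.length 0) = pvAux t (k % 2 == 0) := by
  induction t with
  | nil => intro k; simp [pvOnes, pvScat, pvAux]
  | cons b t ih =>
    intro k
    have hshift := pvOnesShift t 0
    have hnn := pvOnesNonneg t 0 le_rfl
    by_cases hb : b = 1
    · simp only [pvOnes, hb, if_pos, List.length_cons, List.replicate_succ, pvScat,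
        Int.toNat_zero, List.set]
      rw [hshift, pvScatShift _ _ _ _ hnn, ih (k + 1), pvParityFlip]
      cases hk : (k % 2 == 0) <;> simp [pvAux]
    · rw [show pvOnes (b :: t) 0 = pvOnes t (0 + 1) from by simp [pvOnes, hb]]
      simp only [List.length_cons, List.replicate_succ]
      rw [hshift, pvScatShift _ _ _ _ hnn, ih k]
      simp [pvAux, hb]

-- ===== VERDICT (by name: the statement is the Claim_ definition above) =====
theorem bipolar_spec : Claim_equal_bipolar := by
  intro trem _
  unfold Spec_bipolar bipolar bipolar_alt
  rw [pvFoldA trem [] true, List.nil_append, pvOnesEq trem 0, pvScatEq]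
  have := pvMain trem 0
  simpa using this.symm
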